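-- pv_equiv track=rewrite | github.com/AshwiniGidaveer82/Python_Practice_Codes | Object_Orientations/Codes/predict.py | predictPartyVictory
-- ===== SOURCE A (Python) =====
-- from collections import deque
--
-- def predictPartyVictory(senate: str) -> str:
--     n = len(senate)
--     radiant_queue = deque()
--     dire_queue = deque()
--
--     # Step 1: Populate the queues with the indices of 'R' and 'D'
--     for i, s in enumerate(senate):
--         if s == 'R':
--             radiant_queue.append(i)
--         else:
--             dire_queue.append(i)
--
--
--     while radiant_queue and dire_queue:
--         r_index = radiant_queue.popleft()
--         d_index = dire_queue.popleft()
--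
--
--         if r_index < d_index:
--             radiant_queue.append(r_index + n)
--         else:
--             dire_queue.append(d_index + n)
--
--
--     return "Radiant" if radiant_queue else "Dire"
-- ===== SOURCE B (Python) =====
-- def predictPartyVictory(senate: str) -> str:
--     # Single rotating list of party characters: the leading senator bans the
--     # first senator of the opposite party and rejoins at the back of the line.
--     order = list(senate)
--     while any(c == 'R' for c in order) and any(c != 'R' for c in order):
--         leader = order.pop(0)
--         if leader == 'R':
--             victim = next(i for i, c in enumerate(order) if c != 'R')
--         else:
--             victim = next(i for i, c in enumerate(order) if c == 'R')
--         del order[victim]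
--         order.append(leader)
--     return "Radiant" if any(c == 'R' for c in order) else "Dire"
-- ===== Notes on version B (the rewrite author's own statement) =====
-- stated objective: alternative
-- what changed: B replaces A's two index queues with wraparound +n arithmetic by a single rotating list of party characters in which the leading senator removes the first opposing senator and rejoins at the back; the winner is read off by which party is still present.
import Mathlib
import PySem

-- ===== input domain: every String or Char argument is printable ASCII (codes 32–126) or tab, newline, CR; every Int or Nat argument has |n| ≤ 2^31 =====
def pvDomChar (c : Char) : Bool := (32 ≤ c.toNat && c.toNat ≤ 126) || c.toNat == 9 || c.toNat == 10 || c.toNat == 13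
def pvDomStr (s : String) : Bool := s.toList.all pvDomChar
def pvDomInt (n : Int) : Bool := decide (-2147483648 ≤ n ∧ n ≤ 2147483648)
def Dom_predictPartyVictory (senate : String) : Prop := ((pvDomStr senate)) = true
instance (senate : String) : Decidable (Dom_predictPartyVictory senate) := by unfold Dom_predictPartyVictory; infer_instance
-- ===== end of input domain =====

-- B: a single rotating list of party characters (leader removes first opponent, rejoins at back)
-- instead of A's two index queues with +n wraparound; alternative decomposition, return value only.


-- ===== PORT A =====
-- the while loop: pop both fronts, requeue the smaller index shifted by +n
def aLoop (n : Int) (rq dq : List Int) : String :=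
  match rq, dq with
  | r :: rs, d :: ds =>
    if r < d then aLoop n (rs ++ [r + n]) (d :: ds).tail
    else aLoop n (r :: rs).tail (ds ++ [d + n])
  | _, _ => if rq.isEmpty then "Dire" else "Radiant"
termination_by rq.length + dq.length
decreasing_by all_goals simp

def predictPartyVictory (senate : String) : String :=
  let n : Int := PySem.Str.len senate
  let q :=
    (PySem.List.enumerate senate.toList 0).foldl
      (fun (q : List Int × List Int) is =>
        if is.2 == 'R' then (q.1 ++ [is.1], q.2) else (q.1, q.2 ++ [is.1]))
      ([], [])
  aLoop n q.1 q.2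

-- ===== PORT B =====
-- helper for `next(i for i,c in enumerate(order) if …)` followed by `del order[i]`
def eraseFirst {α : Type} (p : α → Bool) : List α → List α
  | [] => []
  | x :: xs => if p x then xs else x :: eraseFirst p xs

theorem length_eraseFirst {α : Type} (p : α → Bool) (xs : List α)
    (h : xs.any p = true) : (eraseFirst p xs).length + 1 = xs.length := by
  induction xs with
  | nil => simp at h
  | cons x xs ih =>
    by_cases hx : p x = true
    · simp [eraseFirst, hx]
    · simp [eraseFirst, hx] at h ⊢
      exact ih (by simpa using h)

def bLoop (order : List Char) : String :=
  if h : order.any (fun c => c == 'R') && order.any (fun c => !(c == 'R')) then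
    match order, h with
    | [], h => False.elim (by simp at h)
    | leader :: rest, h =>
      if hl : leader == 'R' then
        bLoop (eraseFirst (fun c => !(c == 'R')) rest ++ [leader])
      else
        bLoop (eraseFirst (fun c => c == 'R') rest ++ [leader])
  else if order.any (fun c => c == 'R') then "Radiant" else "Dire"
termination_by order.length
decreasing_by
  · have hr : rest.any (fun c => !(c == 'R')) = true := by
      have h2 := (Bool.and_eq_true _ _ |>.mp h).2
      simpa [hl] using h2
    have := length_eraseFirst (fun c => !(c == 'R')) rest hr
    simp; omega
  · have hr : rest.any (fun c => c == 'R') = true := by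
      have h1 := (Bool.and_eq_true _ _ |>.mp h).1
      simpa [hl] using h1
    have := length_eraseFirst (fun c => c == 'R') rest hr
    simp; omega

def predictPartyVictory_alt (senate : String) : String := bLoop senate.toList

-- ===== PRECONDITION & SPEC =====
def Spec_predictPartyVictory (senate : String) (out : String) : Prop := out = predictPartyVictory_alt senate
instance (senate : String) (out : String) : Decidable (Spec_predictPartyVictory senate out) := by unfold Spec_predictPartyVictory; infer_instance

-- ===== CLAIM (what is proved, stated in full; the proofs are below) =====
def Claim_equal_predictPartyVictory : Prop := ∀ (senate : String), Dom_predictPartyVictory senate → Spec_predictPartyVictory senate (predictPartyVictory senate)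

-- ===== LEMMAS AND PROOFS =====

-- merge of the two index queues into the R/not-R pattern (true = Radiant senator)
def mrg : List Int → List Int → List Bool
  | [], ys => ys.map (fun _ => false)
  | x :: xs, [] => (x :: xs).map (fun _ => true)
  | x :: xs, y :: ys =>
    if x < y then true :: mrg xs (y :: ys) else false :: mrg (x :: xs) ys
termination_by xs ys => xs.length + ys.length

theorem mrg_nil_right (xs : List Int) : mrg xs [] = List.replicate xs.length true := by
  cases xs <;> simp [mrg, List.replicate_succ]

theorem mrg_nil_left (ys : List Int) : mrg [] ys = List.replicate ys.length false := by
  simp [mrg]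

theorem map_eraseFirst {α β : Type} (f : α → β) (p : β → Bool) (xs : List α) :
    (eraseFirst (fun x => p (f x)) xs).map f = eraseFirst p (xs.map f) := by
  induction xs with
  | nil => rfl
  | cons x xs ih =>
    by_cases hx : p (f x) = true <;> simp [eraseFirst, hx, ih]

theorem false_mem_mrg (xs ys : List Int) (h : ys ≠ []) : false ∈ mrg xs ys := by
  fun_induction mrg xs ys <;> simp_all

theorem true_mem_mrg (xs ys : List Int) (h : xs ≠ []) : true ∈ mrg xs ys := by
  fun_induction mrg xs ys <;> simp_all

theorem erase_false_mrg (xs : List Int) (d : Int) (ds : List Int)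
    (hd : ∀ e ∈ ds, d < e) :
    eraseFirst (fun b => !b) (mrg xs (d :: ds)) = mrg xs ds := by
  induction xs with
  | nil => simp [mrg, eraseFirst]
  | cons x xs ih =>
    by_cases hx : x < d
    · have h1 : mrg (x :: xs) (d :: ds) = true :: mrg xs (d :: ds) := by simp [mrg, hx]
      have h2 : mrg (x :: xs) ds = true :: mrg xs ds := by
        cases ds with
        | nil => simp [mrg_nil_right, List.replicate_succ]
        | cons e es => have := hd e (by simp); simp [mrg, show x < e by omega]
      rw [h1, h2, eraseFirst]
      simp [ih]
    · have h1 : mrg (x :: xs) (d :: ds) = false :: mrg (x :: xs) ds := by simp [mrg, hx]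
      rw [h1, eraseFirst]
      simp

theorem erase_true_mrg (r : Int) (rs ys : List Int)
    (hr : ∀ e ∈ rs, r < e) :
    eraseFirst (fun b => b) (mrg (r :: rs) ys) = mrg rs ys := by
  induction ys with
  | nil => simp [eraseFirst, mrg_nil_right, List.replicate_succ]
  | cons y ys ih =>
    by_cases hy : r < y
    · have h1 : mrg (r :: rs) (y :: ys) = true :: mrg rs (y :: ys) := by simp [mrg, hy]
      rw [h1, eraseFirst]
      simp
    · have h1 : mrg (r :: rs) (y :: ys) = false :: mrg (r :: rs) ys := by simp [mrg, hy]
      have h2 : mrg rs (y :: ys) = false :: mrg rs ys := by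
        cases rs with
        | nil => simp [mrg]
        | cons e es => have := hr e (by simp); simp [mrg, show ¬ e < y by omega]
      rw [h1, h2, eraseFirst]
      simp [ih]

theorem mrg_append_true_aux : ∀ (k : Nat) (xs ys : List Int) (m : Int),
    xs.length + ys.length = k → (∀ x ∈ xs, x < m) → (∀ y ∈ ys, y < m) →
    mrg (xs ++ [m]) ys = mrg xs ys ++ [true] := by
  intro k
  induction k using Nat.strong_induction_on with
  | _ k ih =>
  intro xs ys m hk hx hy
  cases xs with
  | nil =>
    cases ys with
    | nil => simp [mrg]
    | cons y ys =>
      have hym : ¬ m < y := by have := hy y (by simp); omega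
      have h1 : mrg ([] ++ [m]) (y :: ys) = false :: mrg [m] ys := by simp [mrg, hym]
      have h2 := ih (0 + ys.length) (by simp at hk ⊢; omega) [] ys m (by simp) (by simp) (fun a ha => hy a (by simp [ha]))
      simp only [List.nil_append] at h1 h2 ⊢
      rw [h1, h2, mrg_nil_left, mrg_nil_left]
      simp [List.replicate_succ]
  | cons x xs =>
    cases ys with
    | nil =>
      rw [mrg_nil_right, mrg_nil_right]
      simp [List.replicate_succ']
    | cons y ys =>
      by_cases hxy : x < y
      · have h1 : mrg ((x :: xs) ++ [m]) (y :: ys) = true :: mrg (xs ++ [m]) (y :: ys) := by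
          simp [mrg, hxy]
        have h2 := ih (xs.length + (y :: ys).length) (by simp at hk ⊢; omega) xs (y :: ys) m
          rfl (fun a ha => hx a (by simp [ha])) hy
        rw [h1, h2]
        simp [mrg, hxy]
      · have h1 : mrg ((x :: xs) ++ [m]) (y :: ys) = false :: mrg ((x :: xs) ++ [m]) ys := by
          simp [mrg, hxy]
        have h2 := ih ((x :: xs).length + ys.length) (by simp at hk ⊢; omega) (x :: xs) ys m
          rfl hx (fun a ha => hy a (by simp [ha]))
        rw [h1, h2]
        simp [mrg, hxy]

theorem mrg_append_true (xs ys : List Int) (m : Int)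
    (hx : ∀ x ∈ xs, x < m) (hy : ∀ y ∈ ys, y < m) :
    mrg (xs ++ [m]) ys = mrg xs ys ++ [true] :=
  mrg_append_true_aux (xs.length + ys.length) xs ys m rfl hx hy

theorem mrg_append_false_aux : ∀ (k : Nat) (xs ys : List Int) (m : Int),
    xs.length + ys.length = k → (∀ x ∈ xs, x < m) → (∀ y ∈ ys, y < m) →
    mrg xs (ys ++ [m]) = mrg xs ys ++ [false] := by
  intro k
  induction k using Nat.strong_induction_on with
  | _ k ih =>
  intro xs ys m hk hx hy
  cases ys with
  | nil =>
    cases xs with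
    | nil => simp [mrg]
    | cons x xs =>
      have hxm : x < m := hx x (by simp)
      have h1 : mrg (x :: xs) ([] ++ [m]) = true :: mrg xs [m] := by simp [mrg, hxm]
      have h2 := ih (xs.length + 0) (by simp at hk ⊢; omega) xs [] m (by simp)
        (fun a ha => hx a (by simp [ha])) (by simp)
      simp only [List.nil_append] at h1 h2 ⊢
      rw [h1, h2, mrg_nil_right, mrg_nil_right]
      simp [List.replicate_succ]
  | cons y ys =>
    cases xs with
    | nil =>
      have h1 : mrg [] ((y :: ys) ++ [m]) = false :: mrg [] (ys ++ [m]) := by simp [mrg]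
      have h2 := ih (0 + ys.length) (by simp at hk ⊢; omega) [] ys m (by simp) (by simp)
        (fun a ha => hy a (by simp [ha]))
      rw [h1, h2]
      simp [mrg]
    | cons x xs =>
      by_cases hxy : x < y
      · have h1 : mrg (x :: xs) ((y :: ys) ++ [m]) = true :: mrg xs ((y :: ys) ++ [m]) := by
          simp [mrg, hxy]
        have h2 := ih (xs.length + (y :: ys).length) (by simp at hk ⊢; omega) xs (y :: ys) m
          rfl (fun a ha => hx a (by simp [ha])) hy
        rw [h1, h2]
        simp [mrg, hxy]
      · have h1 : mrg (x :: xs) ((y :: ys) ++ [m]) = false :: mrg (x :: xs) (ys ++ [m]) := by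
          simp [mrg, hxy]
        have h2 := ih ((x :: xs).length + ys.length) (by simp at hk ⊢; omega) (x :: xs) ys m
          rfl hx (fun a ha => hy a (by simp [ha]))
        rw [h1, h2]
        simp [mrg, hxy]

theorem mrg_append_false (xs ys : List Int) (m : Int)
    (hx : ∀ x ∈ xs, x < m) (hy : ∀ y ∈ ys, y < m) :
    mrg xs (ys ++ [m]) = mrg xs ys ++ [false] :=
  mrg_append_false_aux (xs.length + ys.length) xs ys m rfl hx hy

-- the index queues built by A's enumerate loop
def ridx (i : Int) : List Char → List Int
  | [] => []
  | c :: cs => if c == 'R' then i :: ridx (i + 1) cs else ridx (i + 1) cs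

def didx (i : Int) : List Char → List Int
  | [] => []
  | c :: cs => if c == 'R' then didx (i + 1) cs else i :: didx (i + 1) cs

theorem mem_ridx (i x : Int) (cs : List Char) (h : x ∈ ridx i cs) :
    i ≤ x ∧ x < i + cs.length := by
  induction cs generalizing i with
  | nil => simp [ridx] at h
  | cons c cs ih =>
    by_cases hc : c == 'R'
    · simp only [ridx, if_pos hc, List.mem_cons] at h
      rcases h with h | h
      · subst h; simp
      · have := ih (i + 1) h; simp at this ⊢; omega
    · simp only [ridx, if_neg hc] at h
      have := ih (i + 1) h; simp at this ⊢; omega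

theorem mem_didx (i x : Int) (cs : List Char) (h : x ∈ didx i cs) :
    i ≤ x ∧ x < i + cs.length := by
  induction cs generalizing i with
  | nil => simp [didx] at h
  | cons c cs ih =>
    by_cases hc : c == 'R'
    · simp only [didx, if_pos hc] at h
      have := ih (i + 1) h; simp at this ⊢; omega
    · simp only [didx, if_neg hc, List.mem_cons] at h
      rcases h with h | h
      · subst h; simp
      · have := ih (i + 1) h; simp at this ⊢; omega

theorem pairwise_ridx (i : Int) (cs : List Char) : (ridx i cs).Pairwise (· < ·) := by
  induction cs generalizing i with
  | nil => simp [ridx]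
  | cons c cs ih =>
    by_cases hc : c == 'R'
    · simp only [ridx, if_pos hc]
      exact List.Pairwise.cons (fun y hy => by have := (mem_ridx _ _ _ hy).1; omega) (ih (i + 1))
    · simp only [ridx, if_neg hc]
      exact ih (i + 1)

theorem pairwise_didx (i : Int) (cs : List Char) : (didx i cs).Pairwise (· < ·) := by
  induction cs generalizing i with
  | nil => simp [didx]
  | cons c cs ih =>
    by_cases hc : c == 'R'
    · simp only [didx, if_pos hc]
      exact ih (i + 1)
    · simp only [didx, if_neg hc]
      exact List.Pairwise.cons (fun y hy => by have := (mem_didx _ _ _ hy).1; omega) (ih (i + 1))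

theorem disjoint_ridx_didx (i x : Int) (cs : List Char)
    (h1 : x ∈ ridx i cs) (h2 : x ∈ didx i cs) : False := by
  induction cs generalizing i with
  | nil => simp [ridx] at h1
  | cons c cs ih =>
    by_cases hc : c == 'R'
    · simp only [ridx, if_pos hc, List.mem_cons] at h1
      simp only [didx, if_pos hc] at h2
      rcases h1 with h1 | h1
      · subst h1; have := (mem_didx _ _ _ h2).1; omega
      · exact ih (i + 1) h1 h2
    · simp only [ridx, if_neg hc] at h1
      simp only [didx, if_neg hc, List.mem_cons] at h2
      rcases h2 with h2 | h2
      · subst h2; have := (mem_ridx _ _ _ h1).1; omega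
      · exact ih (i + 1) h1 h2

theorem mrg_ridx_didx (cs : List Char) (i : Int) :
    mrg (ridx i cs) (didx i cs) = cs.map (fun c => c == 'R') := by
  induction cs generalizing i with
  | nil => simp [ridx, didx, mrg]
  | cons c cs ih =>
    by_cases hc : c == 'R'
    · simp only [ridx, didx, if_pos hc]
      have h1 : mrg (i :: ridx (i + 1) cs) (didx (i + 1) cs)
          = true :: mrg (ridx (i + 1) cs) (didx (i + 1) cs) := by
        cases hdd : didx (i + 1) cs with
        | nil => simp [mrg_nil_right, List.replicate_succ]
        | cons d ds =>
          have hd : i < d := by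
            have := (mem_didx (i + 1) d cs (by rw [hdd]; simp)).1; omega
          simp [mrg, hd]
      rw [h1, ih (i + 1)]
      simp [hc]
    · simp only [ridx, didx, if_neg hc]
      have h1 : mrg (ridx (i + 1) cs) (i :: didx (i + 1) cs)
          = false :: mrg (ridx (i + 1) cs) (didx (i + 1) cs) := by
        cases hrr : ridx (i + 1) cs with
        | nil => simp [mrg]
        | cons r rs =>
          have hr : ¬ r < i := by
            have := (mem_ridx (i + 1) r cs (by rw [hrr]; simp)).1; omega
          simp [mrg, hr]
      rw [h1, ih (i + 1)]
      simp [hc]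

theorem build_queues (cs : List Char) (i : Int) (rq0 dq0 : List Int) :
    (PySem.List.enumerate cs i).foldl
      (fun (q : List Int × List Int) is =>
        if is.2 == 'R' then (q.1 ++ [is.1], q.2) else (q.1, q.2 ++ [is.1]))
      (rq0, dq0) = (rq0 ++ ridx i cs, dq0 ++ didx i cs) := by
  induction cs generalizing i rq0 dq0 with
  | nil => simp [PySem.List.enumerate_nil, ridx, didx]
  | cons c cs ih =>
    rw [PySem.List.enumerate_cons, List.foldl_cons]
    by_cases hc : (c == 'R') = true
    · rw [if_pos hc, ih (i + 1) (rq0 ++ [i]) dq0]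
      simp [ridx, didx, hc]
    · rw [if_neg hc, ih (i + 1) rq0 (dq0 ++ [i])]
      simp [ridx, didx, hc]

-- the central simulation lemma: A's two-queue loop equals B's rotating-list loop
theorem key (k : Nat) : ∀ (n : Int) (rq dq : List Int) (L : List Char),
    rq.length + dq.length = k →
    rq.Pairwise (· < ·) → dq.Pairwise (· < ·) →
    (∀ x ∈ rq, ∀ y ∈ dq, x ≠ y) →
    (∀ x ∈ rq ++ dq, ∀ y ∈ rq ++ dq, x < y + n) →
    mrg rq dq = L.map (fun c => c == 'R') →
    aLoop n rq dq = bLoop L := by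
  induction k using Nat.strong_induction_on with
  | _ k ih =>
  intro n rq dq L hk hprq hpdq hdis hwin hpat
  cases rq with
  | nil =>
    have hA : aLoop n [] dq = "Dire" := by cases dq <;> simp [aLoop]
    have hnoR : L.any (fun c => c == 'R') = false := by
      rw [List.any_eq_false]
      intro c hc hcR
      have ht : true ∈ L.map (fun c => c == 'R') := by
        rw [← hcR]; exact List.mem_map_of_mem hc
      rw [← hpat, mrg_nil_left] at ht
      simp at ht
    rw [hA, bLoop]
    simp [hnoR]
  | cons r rs =>
  cases dq with
  | nil =>
    have hA : aLoop n (r :: rs) [] = "Radiant" := by simp [aLoop]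
    have hall : ∀ c ∈ L, (c == 'R') = true := by
      intro c hc
      have : (c == 'R') ∈ L.map (fun c => c == 'R') := List.mem_map_of_mem hc
      rw [← hpat, mrg_nil_right] at this
      exact List.eq_of_mem_replicate this
    have hne : L ≠ [] := by
      intro h
      rw [h, mrg_nil_right] at hpat
      simp [List.replicate_succ] at hpat
    have hR : L.any (fun c => c == 'R') = true := by
      cases L with
      | nil => exact absurd rfl hne
      | cons a as => simp [hall a (by simp)]
    have hnoD : L.any (fun c => !(c == 'R')) = false := by
      rw [List.any_eq_false]
      intro c hc
      simp [hall c hc]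
    rw [hA, bLoop]
    simp [hnoD, hR]
  | cons d ds =>
    have hrd : r ≠ d := hdis r (by simp) d (by simp)
    have hn : 0 < n := by have := hwin r (by simp) r (by simp); omega
    by_cases hlt : r < d
    · -- radiant leader: A requeues r + n, dire front d is eliminated
      have hpat1 : mrg (r :: rs) (d :: ds) = true :: mrg rs (d :: ds) := by simp [mrg, hlt]
      cases L with
      | nil => rw [hpat1] at hpat; simp at hpat
      | cons leader rest =>
      rw [hpat1] at hpat
      simp only [List.map_cons] at hpat
      have hlead : (leader == 'R') = true := (List.cons.inj hpat).1.symm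
      have hrest : mrg rs (d :: ds) = rest.map (fun c => c == 'R') := (List.cons.inj hpat).2
      have hAnyR : (leader :: rest).any (fun c => c == 'R') = true := by simp [hlead]
      have hAnyD : (leader :: rest).any (fun c => !(c == 'R')) = true := by
        have hf : false ∈ mrg (r :: rs) (d :: ds) := false_mem_mrg _ _ (by simp)
        rw [hpat1, List.mem_cons] at hf
        rcases hf with hf | hf
        · simp at hf
        · rw [hrest] at hf
          rcases List.mem_map.mp hf with ⟨c, hcL, hcv⟩
          refine List.any_eq_true.mpr ⟨c, by simp [hcL], ?_⟩
          simp [hcv]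
      have hB : bLoop (leader :: rest)
          = bLoop (eraseFirst (fun c => !(c == 'R')) rest ++ [leader]) := by
        rw [bLoop, dif_pos (by simp [hAnyR, hAnyD])]
        change (if _ : (leader == 'R') = true then
            bLoop (eraseFirst (fun c => !(c == 'R')) rest ++ [leader])
          else bLoop (eraseFirst (fun c => c == 'R') rest ++ [leader])) = _
        rw [dif_pos hlead]
      have hA1 : aLoop n (r :: rs) (d :: ds) = aLoop n (rs ++ [r + n]) ds := by
        rw [aLoop]
        simp [hlt]
      rw [hA1, hB]
      have hbnd : ∀ x ∈ rs ++ ds, x < r + n := by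
        intro x hx
        rcases List.mem_append.mp hx with hx | hx
        · exact hwin x (by simp [hx]) r (by simp)
        · exact hwin x (by simp [hx]) r (by simp)
      have hpat' : mrg (rs ++ [r + n]) ds
          = (eraseFirst (fun c => !(c == 'R')) rest ++ [leader]).map (fun c => c == 'R') := by
        rw [List.map_append]
        have e1 : (eraseFirst (fun c => !(c == 'R')) rest).map (fun c => c == 'R')
            = eraseFirst (fun b => !b) (rest.map (fun c => c == 'R')) :=
          map_eraseFirst (fun c => c == 'R') (fun b => !b) rest
        rw [e1, ← hrest, erase_false_mrg rs d ds (by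
          intro e he
          exact (List.pairwise_cons.mp hpdq).1 e he)]
        rw [mrg_append_true rs ds (r + n)
          (fun x hx => hbnd x (by simp [hx])) (fun y hy => hbnd y (by simp [hy]))]
        simp [hlead]
      refine ih ((rs ++ [r + n]).length + ds.length) (by simp at hk ⊢; omega)
        n (rs ++ [r + n]) ds _ rfl ?_ ?_ ?_ ?_ hpat'
      · rw [List.pairwise_append]
        refine ⟨(List.pairwise_cons.mp hprq).2, by simp, ?_⟩
        intro x hx y hy
        simp at hy
        subst hy
        exact hbnd x (by simp [hx])
      · exact (List.pairwise_cons.mp hpdq).2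
      · intro x hx y hy
        rcases List.mem_append.mp hx with hx | hx
        · exact hdis x (by simp [hx]) y (by simp [hy])
        · simp at hx
          subst hx
          have := hbnd y (by simp [hy])
          omega
      · intro x hx y hy
        have hmem : ∀ z, z ∈ (rs ++ [r + n]) ++ ds → z = r + n ∨ z ∈ rs ++ ds := by
          intro z hz
          rcases List.mem_append.mp hz with hz | hz
          · rcases List.mem_append.mp hz with hz | hz
            · exact Or.inr (List.mem_append.mpr (Or.inl hz))
            · simp at hz; exact Or.inl hz
          · exact Or.inr (List.mem_append.mpr (Or.inr hz))
        have hold : ∀ z, z ∈ rs ++ ds → z ∈ (r :: rs) ++ (d :: ds) := by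
          intro z hz
          rcases List.mem_append.mp hz with hz | hz
          · simp [hz]
          · simp [hz]
        have hgt : ∀ z, z ∈ rs ++ ds → r < z := by
          intro z hz
          rcases List.mem_append.mp hz with hz | hz
          · exact (List.pairwise_cons.mp hprq).1 z hz
          · have := (List.pairwise_cons.mp hpdq).1 z hz; omega
        rcases hmem x hx with hx' | hx' <;> rcases hmem y hy with hy' | hy'
        · subst hx'; subst hy'; omega
        · subst hx'; have := hgt y hy'; omega
        · subst hy'; have := hwin x (hold x hx') r (by simp); omega
        · exact hwin x (hold x hx') y (hold y hy')
    · -- dire leader: A requeues d + n, radiant front r is eliminated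
      have hdr : d < r := by omega
      have hpat1 : mrg (r :: rs) (d :: ds) = false :: mrg (r :: rs) ds := by simp [mrg, hlt]
      cases L with
      | nil => rw [hpat1] at hpat; simp at hpat
      | cons leader rest =>
      rw [hpat1] at hpat
      simp only [List.map_cons] at hpat
      have hlead : (leader == 'R') = false := (List.cons.inj hpat).1.symm
      have hrest : mrg (r :: rs) ds = rest.map (fun c => c == 'R') := (List.cons.inj hpat).2
      have hAnyD : (leader :: rest).any (fun c => !(c == 'R')) = true := by simp [hlead]
      have hAnyR : (leader :: rest).any (fun c => c == 'R') = true := by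
        have hf : true ∈ mrg (r :: rs) (d :: ds) := true_mem_mrg _ _ (by simp)
        rw [hpat1, List.mem_cons] at hf
        rcases hf with hf | hf
        · simp at hf
        · rw [hrest] at hf
          rcases List.mem_map.mp hf with ⟨c, hcL, hcv⟩
          exact List.any_eq_true.mpr ⟨c, by simp [hcL], by simp [hcv]⟩
      have hB : bLoop (leader :: rest)
          = bLoop (eraseFirst (fun c => c == 'R') rest ++ [leader]) := by
        rw [bLoop, dif_pos (by simp [hAnyR, hAnyD])]
        change (if _ : (leader == 'R') = true then
            bLoop (eraseFirst (fun c => !(c == 'R')) rest ++ [leader])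
          else bLoop (eraseFirst (fun c => c == 'R') rest ++ [leader])) = _
        rw [dif_neg (by simp [hlead])]
      have hA1 : aLoop n (r :: rs) (d :: ds) = aLoop n rs (ds ++ [d + n]) := by
        rw [aLoop]
        simp [hlt]
      rw [hA1, hB]
      have hbnd : ∀ x ∈ rs ++ ds, x < d + n := by
        intro x hx
        rcases List.mem_append.mp hx with hx | hx
        · exact hwin x (by simp [hx]) d (by simp)
        · exact hwin x (by simp [hx]) d (by simp)
      have hpat' : mrg rs (ds ++ [d + n])
          = (eraseFirst (fun c => c == 'R') rest ++ [leader]).map (fun c => c == 'R') := by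
        rw [List.map_append]
        have e1 : (eraseFirst (fun c => c == 'R') rest).map (fun c => c == 'R')
            = eraseFirst (fun b => b) (rest.map (fun c => c == 'R')) :=
          map_eraseFirst (fun c => c == 'R') (fun b => b) rest
        rw [e1, ← hrest, erase_true_mrg r rs ds (by
          intro e he
          exact (List.pairwise_cons.mp hprq).1 e he)]
        rw [mrg_append_false rs ds (d + n)
          (fun x hx => hbnd x (by simp [hx])) (fun y hy => hbnd y (by simp [hy]))]
        simp [hlead]
      refine ih (rs.length + (ds ++ [d + n]).length) (by simp at hk ⊢; omega)
        n rs (ds ++ [d + n]) _ rfl ?_ ?_ ?_ ?_ hpat'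
      · exact (List.pairwise_cons.mp hprq).2
      · rw [List.pairwise_append]
        refine ⟨(List.pairwise_cons.mp hpdq).2, by simp, ?_⟩
        intro x hx y hy
        simp at hy
        subst hy
        exact hbnd x (by simp [hx])
      · intro x hx y hy
        rcases List.mem_append.mp hy with hy | hy
        · exact hdis x (by simp [hx]) y (by simp [hy])
        · simp at hy
          subst hy
          have := hbnd x (by simp [hx])
          omega
      · intro x hx y hy
        have hmem : ∀ z, z ∈ rs ++ (ds ++ [d + n]) → z = d + n ∨ z ∈ rs ++ ds := by
          intro z hz
          rcases List.mem_append.mp hz with hz | hz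
          · exact Or.inr (List.mem_append.mpr (Or.inl hz))
          · rcases List.mem_append.mp hz with hz | hz
            · exact Or.inr (List.mem_append.mpr (Or.inr hz))
            · simp at hz; exact Or.inl hz
        have hold : ∀ z, z ∈ rs ++ ds → z ∈ (r :: rs) ++ (d :: ds) := by
          intro z hz
          rcases List.mem_append.mp hz with hz | hz
          · simp [hz]
          · simp [hz]
        have hgt : ∀ z, z ∈ rs ++ ds → d < z := by
          intro z hz
          rcases List.mem_append.mp hz with hz | hz
          · have := (List.pairwise_cons.mp hprq).1 z hz; omega
          · exact (List.pairwise_cons.mp hpdq).1 z hz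
        rcases hmem x hx with hx' | hx' <;> rcases hmem y hy with hy' | hy'
        · subst hx'; subst hy'; omega
        · subst hx'; have := hgt y hy'; omega
        · subst hy'; have := hwin x (hold x hx') d (by simp); omega
        · exact hwin x (hold x hx') y (hold y hy')


-- ===== VERDICT (by name: the statement is the Claim_ definition above) =====
theorem predictPartyVictory_spec : Claim_equal_predictPartyVictory := by
  intro senate _
  unfold Spec_predictPartyVictory
  simp only [predictPartyVictory, predictPartyVictory_alt]
  rw [build_queues senate.toList 0 [] []]
  simp only [List.nil_append]
  have hlen : PySem.Str.len senate = (senate.toList.length : Int) := by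
    simp [PySem.Str.len_eq]
  rw [hlen]
  refine key ((ridx 0 senate.toList).length + (didx 0 senate.toList).length)
    (senate.toList.length : Int) (ridx 0 senate.toList) (didx 0 senate.toList) senate.toList
    rfl (pairwise_ridx 0 senate.toList) (pairwise_didx 0 senate.toList) ?_ ?_
    (mrg_ridx_didx senate.toList 0)
  · intro x hx y hy heq
    subst heq
    exact disjoint_ridx_didx 0 x senate.toList hx hy
  · intro x hx y hy
    have hb : ∀ z, z ∈ ridx 0 senate.toList ++ didx 0 senate.toList →
        0 ≤ z ∧ z < (senate.toList.length : Int) := by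
      intro z hz
      rcases List.mem_append.mp hz with h | h
      · have := mem_ridx 0 z senate.toList h; omega
      · have := mem_didx 0 z senate.toList h; omega
    have h1 := hb x hx
    have h2 := hb y hy
    omega
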